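-- pv_equiv track=rewrite | github.com/SwLee7/When-I-solve-algorithm | 프로그래머스/unrated/181935. 홀짝에 따라 다른 값 반환하기/홀짝에 따라 다른 값 반환하기.py | solution
-- ===== SOURCE A (Python) =====
-- def solution(n):
--     answer = 0
--     for i in range(1, n+1, 2):
--         if n % 2 == 0:
--             answer += (i+1)**2
--         else :
--             answer += i
--     return answer
-- ===== SOURCE B (Python) =====
-- def solution(n):
--     # closed-form per parity: O(1) instead of A's O(n) loop
--     if n <= 0:
--         return 0
--     if n % 2:
--         m = (n + 1) // 2
--         return m * m          # sum of odd numbers 1..n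
--     m = n // 2
--     return 2 * m * (m + 1) * (2 * m + 1) // 3   # sum of even squares 2^2..n^2
-- ===== Notes on version B (the rewrite author's own statement) =====
-- stated objective: faster
-- what changed: Replaces A's O(n) loop over the odd numbers with closed-form formulas: m^2 for odd n and 2m(m+1)(2m+1)/3 (sum of even squares) for even n.
import Mathlib
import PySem

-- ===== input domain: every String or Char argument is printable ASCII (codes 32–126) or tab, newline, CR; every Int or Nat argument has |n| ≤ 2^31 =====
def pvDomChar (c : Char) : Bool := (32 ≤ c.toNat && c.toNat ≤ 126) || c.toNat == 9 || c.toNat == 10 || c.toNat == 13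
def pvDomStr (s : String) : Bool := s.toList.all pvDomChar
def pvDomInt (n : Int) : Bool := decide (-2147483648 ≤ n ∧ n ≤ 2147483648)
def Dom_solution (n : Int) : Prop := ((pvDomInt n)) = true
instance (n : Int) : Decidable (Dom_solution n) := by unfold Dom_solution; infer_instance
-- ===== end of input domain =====

-- B replaces A's O(n) loop over the odd numbers with closed-form formulas per parity.


-- ===== PORT A =====
def solution (n : Int) : Int :=
  (PySem.List.pyRange 1 (n + 1) 2).foldl
    (fun answer i =>
      if PySem.Int.mod n 2 == 0 then answer + (i + 1) ^ 2 else answer + i)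
    0

-- ===== PORT B =====
def solution_alt (n : Int) : Int :=
  if n ≤ 0 then 0
  else if PySem.Int.mod n 2 ≠ 0 then
    let m := PySem.Int.floordiv (n + 1) 2
    m * m
  else
    let m := PySem.Int.floordiv n 2
    PySem.Int.floordiv (2 * m * (m + 1) * (2 * m + 1)) 3

-- ===== PRECONDITION & SPEC =====
def Spec_solution (n : Int) (out : Int) : Prop := out = solution_alt n
instance (n : Int) (out : Int) : Decidable (Spec_solution n out) := by unfold Spec_solution; infer_instance

-- ===== CLAIM (what is proved, stated in full; the proofs are below) =====
def Claim_equal_solution : Prop := ∀ (n : Int), Dom_solution n → Spec_solution n (solution n)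

-- ===== LEMMAS AND PROOFS =====

-- fold of A's odd-branch body over range m, init generalized
lemma fold_odd (m : Nat) (init : Int) :
    (List.range m).foldl (fun (acc : Int) (k : Nat) => acc + (1 + 2 * (k : Int))) init
      = init + (m : Int) * (m : Int) := by
  induction m generalizing init with
  | zero => simp
  | succ m ih =>
      rw [List.range_succ, List.foldl_append]
      simp only [List.foldl_cons, List.foldl_nil, ih]
      push_cast
      ring

-- fold of A's even-branch body over range m, init generalized; stated ×3 to avoid division
lemma fold_even (m : Nat) (init : Int) :
    3 * ((List.range m).foldl (fun (acc : Int) (k : Nat) => acc + (1 + 2 * (k : Int) + 1) ^ 2) init)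
      = 3 * init + 2 * (m : Int) * ((m : Int) + 1) * (2 * (m : Int) + 1) := by
  induction m generalizing init with
  | zero => simp
  | succ m ih =>
      rw [List.range_succ, List.foldl_append]
      simp only [List.foldl_cons, List.foldl_nil]
      rw [mul_add, ih]
      push_cast
      ring

theorem solution_spec_aux (n : Int) : solution n = solution_alt n := by
  unfold solution solution_alt
  have hmod : PySem.Int.mod n 2 = n % 2 := by
    show Int.fmod n 2 = n % 2
    rw [Int.fmod_eq_emod_of_nonneg _ (by norm_num)]
  have hfd : ∀ a : Int, PySem.Int.floordiv a 2 = a / 2 := by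
    intro a
    show Int.fdiv a 2 = a / 2
    rw [Int.fdiv_eq_ediv, if_pos (Or.inl (by norm_num))]
    ring
  rw [PySem.List.pyRange_of_pos _ _ (by norm_num)]
  by_cases hn : n ≤ 0
  · rw [if_neg (by omega), if_pos hn]
    simp
  · rw [if_pos (by omega), if_neg hn]
    rw [List.foldl_map]
    have h2 : n % 2 = 0 ∨ n % 2 = 1 := by omega
    rcases h2 with h | h
    · -- even n
      simp only [hmod, h, beq_self_eq_true, if_true]
      rw [if_neg (by simp)]
      have harg : ((n + 1 - 1 + 2 - 1) / 2).toNat = (n / 2).toNat := by omega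
      rw [harg]
      have hfold := fold_even (n / 2).toNat 0
      have hm : ((n / 2).toNat : Int) = n / 2 := by omega
      rw [hm] at hfold
      rw [hfd]
      show _ = Int.fdiv (2 * (n / 2) * (n / 2 + 1) * (2 * (n / 2) + 1)) 3
      rw [Int.fdiv_eq_ediv]
      rw [if_pos (Or.inl (by norm_num))]
      generalize hS : (List.range (n / 2).toNat).foldl
          (fun (acc : Int) (k : Nat) => acc + (1 + 2 * (k : Int) + 1) ^ 2) 0 = S at hfold ⊢
      generalize 2 * (n / 2) * (n / 2 + 1) * (2 * (n / 2) + 1) = P at hfold ⊢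
      omega
    · -- odd n
      simp only [hmod, h]
      rw [if_pos (by decide)]
      simp only [show ((1 : Int) == 0) = false from rfl, Bool.false_eq_true, if_false]
      have harg : ((n + 1 - 1 + 2 - 1) / 2).toNat = ((n + 1) / 2).toNat := by omega
      rw [harg]
      have hfold := fold_odd ((n + 1) / 2).toNat 0
      have hm : (((n + 1) / 2).toNat : Int) = (n + 1) / 2 := by omega
      rw [hm] at hfold
      rw [hfd]
      rw [hfold]
      ring

-- ===== VERDICT (by name: the statement is the Claim_ definition above) =====
theorem solution_spec : Claim_equal_solution := by
  intro n _
  show solution n = solution_alt n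
  exact solution_spec_aux n
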